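-- pv_equiv track=rewrite | github.com/league3236/MyNewAlgorithmStudy | gymsuit.py | people_list
-- ===== SOURCE A (Python) =====
-- def people_list(n, lost, reserve):
--     people = [0]*n
--     for i in range(1,n+1):
--         if i in lost:
--             people[i-1] = 0
--             continue
--         if i in reserve:
--             people[i-1] = 2
--         else:
--             people[i-1] = 1
--     return people
-- ===== SOURCE B (Python) =====
-- def people_list(n, lost, reserve):
--     people = [1] * n
--     for r in reserve:
--         if 1 <= r <= n:
--             people[r - 1] = 2
--     for l in lost:
--         if 1 <= l <= n:
--             people[l - 1] = 0
--     return people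
-- ===== Notes on version B (the rewrite author's own statement) =====
-- stated objective: faster
-- what changed: Instead of scanning all n positions and testing membership in lost/reserve for each (O(n*(|lost|+|reserve|))), B initialises everyone to 1 and writes only the overridden positions by looping over reserve then lost (lost last, matching A's lost-first priority), with a bounds guard mirroring A's implicit ignoring of out-of-range values.
import Mathlib
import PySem

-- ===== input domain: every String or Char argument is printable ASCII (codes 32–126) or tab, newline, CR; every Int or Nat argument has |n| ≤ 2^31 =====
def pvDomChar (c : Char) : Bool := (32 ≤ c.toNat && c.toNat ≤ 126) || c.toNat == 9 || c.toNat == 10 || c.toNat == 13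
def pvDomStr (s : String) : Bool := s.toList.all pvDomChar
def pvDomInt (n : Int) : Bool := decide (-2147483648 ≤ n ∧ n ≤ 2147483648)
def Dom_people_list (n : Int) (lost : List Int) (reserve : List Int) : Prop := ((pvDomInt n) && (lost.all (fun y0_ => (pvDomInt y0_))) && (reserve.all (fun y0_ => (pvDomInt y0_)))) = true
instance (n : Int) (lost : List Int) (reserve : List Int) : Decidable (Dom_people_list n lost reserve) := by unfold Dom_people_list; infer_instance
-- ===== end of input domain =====

-- B writes only the overridden positions (reserve then lost) over a [1]*n base instead of
-- scanning every position and testing membership; objective: faster.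


-- ===== PORT A =====
-- people = [0]*n; for i in range(1,n+1): lost → 0 (continue), reserve → 2, else 1.
-- people[i-1] = v is List.set (i-1).toNat v; i ∈ [1,n] so the index is always in range.
def people_list (n : Int) (lost : List Int) (reserve : List Int) : List Int :=
  (PySem.List.pyRange 1 (n+1) 1).foldl
    (fun people i =>
      if i ∈ lost then people.set (i-1).toNat 0
      else if i ∈ reserve then people.set (i-1).toNat 2
      else people.set (i-1).toNat 1)
    (List.replicate n.toNat 0)

-- ===== PORT B =====
-- people = [1]*n; guarded writes: reserve positions → 2, then lost positions → 0.
def people_list_alt (n : Int) (lost : List Int) (reserve : List Int) : List Int :=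
  let base := List.replicate n.toNat 1
  let afterR := reserve.foldl (fun p r => if 1 ≤ r ∧ r ≤ n then p.set (r-1).toNat 2 else p) base
  lost.foldl (fun p l => if 1 ≤ l ∧ l ≤ n then p.set (l-1).toNat 0 else p) afterR

-- ===== PRECONDITION & SPEC =====
def Spec_people_list (n : Int) (lost : List Int) (reserve : List Int) (out : List Int) : Prop := out = people_list_alt n lost reserve
instance (n : Int) (lost : List Int) (reserve : List Int) (out : List Int) : Decidable (Spec_people_list n lost reserve out) := by unfold Spec_people_list; infer_instance

-- ===== CLAIM (what is proved, stated in full; the proofs are below) =====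
def Claim_equal_people_list : Prop := ∀ (n : Int) (lost : List Int) (reserve : List Int), Dom_people_list n lost reserve → Spec_people_list n lost reserve (people_list n lost reserve)

-- ===== LEMMAS AND PROOFS =====

-- the intended value at 1-based position i
def pvVal (lost reserve : List Int) (i : Int) : Int :=
  if i ∈ lost then 0 else if i ∈ reserve then 2 else 1

-- B-side: a guarded-write fold changes getElem? j to v exactly when (j+1) occurs in ws and j < n
theorem writeFold_getElem? (n : Int) (v : Int) (ws : List Int) (p : List Int)
    (hp : p.length = n.toNat) (j : Nat) :
    (ws.foldl (fun p x => if 1 ≤ x ∧ x ≤ n then p.set (x-1).toNat v else p) p)[j]?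
      = if ((j : Int) + 1) ∈ ws ∧ j < n.toNat then some v else p[j]? := by
  induction ws generalizing p with
  | nil => simp
  | cons x ws ih =>
    simp only [List.foldl_cons]
    rw [ih]
    · by_cases hb : 1 ≤ x ∧ x ≤ n
      · by_cases hx : x = (j : Int) + 1
        · subst hx
          have hj : j < n.toNat := by omega
          have : ((j : Int) + 1 - 1).toNat = j := by omega
          simp [hb, hj, this, List.getElem?_set, hp]
        · have hne : ((x - 1).toNat) ≠ j := by omega
          rw [if_pos hb, List.getElem?_set_ne hne]
          by_cases hm : ((j : Int) + 1) ∈ ws <;> by_cases hj : j < n.toNat <;>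
            simp_all [List.mem_cons] <;> omega
      · rw [if_neg hb]
        by_cases hm : ((j : Int) + 1) ∈ ws <;> by_cases hj : j < n.toNat <;>
          simp_all [List.mem_cons] <;> omega
    · by_cases hb : 1 ≤ x ∧ x ≤ n <;> simp [hb, hp]

-- A-side: the range fold writes pvVal (j+1) at every j < n
theorem rangeFold_getElem? (n : Int) (lost reserve : List Int) (a : Int) (p : List Int)
    (hp : p.length = n.toNat) (ha : 1 ≤ a) (j : Nat) :
    (((PySem.List.pyRange a (n+1) 1).foldl
        (fun people i =>
          if i ∈ lost then people.set (i-1).toNat 0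
          else if i ∈ reserve then people.set (i-1).toNat 2
          else people.set (i-1).toNat 1) p)[j]?)
      = if a ≤ (j : Int) + 1 ∧ j < n.toNat then some (pvVal lost reserve ((j : Int) + 1))
        else p[j]? := by
  by_cases hab : a < n + 1
  · rw [PySem.List.pyRange_one_cons hab, List.foldl_cons]
    have hset : ∀ (v : Int), (p.set (a-1).toNat v).length = n.toNat := by
      intro v; simp [hp]
    have step : ∀ q, q = (if a ∈ lost then p.set (a-1).toNat 0
          else if a ∈ reserve then p.set (a-1).toNat 2
          else p.set (a-1).toNat 1) → q.length = n.toNat := by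
      intro q hq; rw [hq]; split_ifs <;> simp [hp]
    rw [rangeFold_getElem? n lost reserve (a+1) _ (step _ rfl) (by omega) j]
    by_cases hj : j < n.toNat
    · by_cases h1 : a + 1 ≤ (j : Int) + 1
      · simp [hj, h1, show a ≤ (j:Int)+1 by omega]
      · have hja : ((j : Int) + 1 = a) ∨ ¬ a ≤ (j : Int) + 1 := by omega
        rcases hja with hja | hja
        · have hidx : (a - 1).toNat = j := by omega
          simp only [h1, hj, and_true, and_false, if_false, ← hja, hidx]
          unfold pvVal
          split_ifs <;> first
            | omega
            | simp [List.getElem?_set_self, hp, hj]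
        · have hne : ((a - 1).toNat) ≠ j := by omega
          rw [if_neg (by omega : ¬(a + 1 ≤ (j:Int) + 1 ∧ j < n.toNat)),
              if_neg (by omega : ¬(a ≤ (j:Int) + 1 ∧ j < n.toNat))]
          split_ifs <;> rw [List.getElem?_set_ne hne]
    · simp only [hj, and_false, if_false]
      have hpj : p[j]? = none := by rw [List.getElem?_eq_none]; omega
      have hq : ∀ v : Int, (p.set (a-1).toNat v)[j]? = none := by
        intro v; rw [List.getElem?_eq_none]; simp [hp]; omega
      split_ifs <;> simp [hpj] <;> omega
  · rw [PySem.List.pyRange_one_eq_nil (by omega), List.foldl_nil]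
    rw [if_neg (by omega : ¬(a ≤ (j:Int) + 1 ∧ j < n.toNat))]
termination_by (n + 1 - a).toNat
decreasing_by omega

-- a guarded-write fold preserves the list length
theorem writeFold_length (n v : Int) (ws p : List Int) :
    (ws.foldl (fun p x => if 1 ≤ x ∧ x ≤ n then p.set (x-1).toNat v else p) p).length
      = p.length := by
  induction ws generalizing p with
  | nil => rfl
  | cons x ws ih =>
    simp only [List.foldl_cons]
    rw [ih]
    split_ifs <;> simp

-- ===== VERDICT (by name: the statement is the Claim_ definition above) =====
theorem people_list_spec : Claim_equal_people_list := by
  intro n lost reserve _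
  unfold Spec_people_list people_list people_list_alt
  apply List.ext_getElem?
  intro j
  rw [rangeFold_getElem? n lost reserve 1 _ (by simp) le_rfl j]
  rw [writeFold_getElem? n 0 lost _ (by rw [writeFold_length]; simp) j]
  rw [writeFold_getElem? n 2 reserve _ (by simp) j]
  by_cases hj : j < n.toNat
  · have h1 : (1:Int) ≤ (j:Int) + 1 := by omega
    simp only [h1, hj, and_true, if_true, pvVal]
    by_cases hl : ((j : Int) + 1) ∈ lost <;>
      by_cases hr : ((j : Int) + 1) ∈ reserve <;>
        simp [hl, hr, hj]
  · simp [hj]
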